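-- pv_equiv track=rewrite | github.com/StefanoBelli/foi1819 | make_corner.py | corner
-- ===== SOURCE A (Python) =====
-- def corner(mat, chr='*'):
--     ncols = len(mat[0])
--     nrows = len(mat)
--
--     put_at_row = [0, nrows - 1]
--     for i in range(2):
--         for j in range(ncols):
--             mat[put_at_row[i]][j] = chr
--
--     put_at_col = [0, ncols - 1]
--     for i in range(2):
--         for j in range(nrows):
--             mat[j][put_at_col[i]] = chr
--
--     return mat
-- ===== SOURCE B (Python) =====
-- def corner(mat, chr='*'):
--     ncols = len(mat[0])
--     last = len(mat) - 1
--     for i, row in enumerate(mat):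
--         if i == 0 or i == last:
--             for j in range(ncols):
--                 row[j] = chr
--         else:
--             row[0] = chr
--             row[ncols - 1] = chr
--     return mat
-- ===== Notes on version B (the rewrite author's own statement) =====
-- stated objective: simpler
-- what changed: Replaces A's four separate border sweeps (two row sweeps driven by an index table, then two column sweeps over all rows) with a single enumerate pass over the rows that fills the whole first/last row and only the two edge cells of every middle row, so no cell is written twice except the four corners once.
import Mathlib
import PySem

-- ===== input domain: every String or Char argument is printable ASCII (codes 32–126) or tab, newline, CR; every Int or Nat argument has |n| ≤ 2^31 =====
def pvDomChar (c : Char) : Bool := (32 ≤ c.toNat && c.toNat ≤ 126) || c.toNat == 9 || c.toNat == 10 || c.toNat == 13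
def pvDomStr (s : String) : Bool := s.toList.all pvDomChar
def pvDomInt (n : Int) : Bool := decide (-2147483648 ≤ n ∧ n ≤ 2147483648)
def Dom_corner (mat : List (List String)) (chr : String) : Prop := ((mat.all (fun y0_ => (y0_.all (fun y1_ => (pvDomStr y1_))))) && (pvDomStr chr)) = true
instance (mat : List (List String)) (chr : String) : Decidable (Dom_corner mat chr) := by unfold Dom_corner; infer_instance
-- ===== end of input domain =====

-- B replaces A's four border sweeps with one position-branched pass over the rows (same return value;
-- both A and B mutate mat in place in Python — the mutation is identical, the theorem is about the return value).


-- ===== PORT A =====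
def corner (mat : List (List String)) (chr : String) : List (List String) :=
  let ncols : Int := (PySem.List.pyGetD mat 0 []).length   -- len(mat[0]); Pre_ guarantees mat ≠ []
  let nrows : Int := mat.length
  let putAtRow : List Int := [0, nrows - 1]
  let m1 := (PySem.List.pyRange 0 2 1).foldl (fun m i =>
    (PySem.List.pyRange 0 ncols 1).foldl (fun m j =>
      PySem.List.pySetD m (PySem.List.pyGetD putAtRow i 0)
        (PySem.List.pySetD (PySem.List.pyGetD m (PySem.List.pyGetD putAtRow i 0) []) j chr)) m) mat
  let putAtCol : List Int := [0, ncols - 1]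
  let m2 := (PySem.List.pyRange 0 2 1).foldl (fun m i =>
    (PySem.List.pyRange 0 nrows 1).foldl (fun m j =>
      PySem.List.pySetD m j
        (PySem.List.pySetD (PySem.List.pyGetD m j []) (PySem.List.pyGetD putAtCol i 0) chr)) m) m1
  m2

-- ===== PORT B =====
def corner_alt (mat : List (List String)) (chr : String) : List (List String) :=
  let ncols : Int := (PySem.List.pyGetD mat 0 []).length   -- len(mat[0]); Pre_ guarantees mat ≠ []
  let last : Int := (mat.length : Int) - 1
  (PySem.List.enumerate mat).map (fun p =>
    if p.1 = 0 ∨ p.1 = last then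
      (PySem.List.pyRange 0 ncols 1).foldl (fun r j => PySem.List.pySetD r j chr) p.2
    else
      PySem.List.pySetD (PySem.List.pySetD p.2 0 chr) (ncols - 1) chr)

-- ===== PRECONDITION & SPEC =====
-- Pre_ is exactly where the Python A returns: mat nonempty, at least one column, and every row at
-- least as long as row 0 (otherwise A raises IndexError in one of its sweeps).
def Pre_corner (mat : List (List String)) (_chr : String) : Prop :=
  0 < (mat.headD []).length ∧ ∀ row ∈ mat, (mat.headD []).length ≤ row.length
instance (mat : List (List String)) (chr : String) : Decidable (Pre_corner mat chr) := by unfold Pre_corner; infer_instance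
def pvWitness_corner : List (List String) × String := ([["a", "b"], ["c", "d"], ["e", "f"]], "*")

def Spec_corner (mat : List (List String)) (chr : String) (out : List (List String)) : Prop := out = corner_alt mat chr
instance (mat : List (List String)) (chr : String) (out : List (List String)) : Decidable (Spec_corner mat chr out) := by unfold Spec_corner; infer_instance

-- ===== CLAIM (what is proved, stated in full; the proofs are below) =====
def Claim_equal_corner : Prop := ∀ (mat : List (List String)) (chr : String), Dom_corner mat chr → Pre_corner mat chr → Spec_corner mat chr (corner mat chr)

-- ===== LEMMAS AND PROOFS =====

-- filling positions 0..k-1 of pre ++ t (the fold starts at index pre.length)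
theorem fillAux {α : Type} (chr : α) :
    ∀ (k : Nat) (t pre : List α), k ≤ t.length →
      (PySem.List.pyRange (pre.length : Int) ((pre.length : Int) + k) 1).foldl
        (fun r j => PySem.List.pySetD r j chr) (pre ++ t)
      = pre ++ List.replicate k chr ++ t.drop k := by
  intro k
  induction k with
  | zero => intro t pre _; simp [PySem.List.pyRange_one_eq_nil]
  | succ k ih =>
    intro t pre hk
    cases t with
    | nil => simp at hk
    | cons x t' =>
      rw [PySem.List.pyRange_one_cons (by omega)]
      simp only [List.foldl_cons, PySem.List.pySetD_natCast]
      have hset : (pre ++ x :: t').set pre.length chr = (pre ++ [chr]) ++ t' := by simp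
      rw [hset]
      have harith : ((pre ++ [chr]).length : Int) = (pre.length : Int) + 1 := by
        simp
      have := ih t' (pre ++ [chr]) (by simpa using hk)
      rw [harith] at this
      have harith2 : (pre.length : Int) + 1 + (k : Int) = (pre.length : Int) + ((k + 1 : Nat) : Int) := by
        push_cast; ring
      rw [harith2] at this
      rw [this]
      simp [List.replicate_succ]

theorem fill0 {α : Type} (chr : α) (row : List α) (c : Nat) (h : c ≤ row.length) :
    (PySem.List.pyRange 0 (c : Int) 1).foldl (fun r j => PySem.List.pySetD r j chr) row
      = List.replicate c chr ++ row.drop c := by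
  have := fillAux chr c row [] h
  simpa using this

-- a fold that sets each row index independently is a map
theorem mapAux {β : Type} (g : β → β) (d : β) :
    ∀ (t pre : List β),
      (PySem.List.pyRange (pre.length : Int) ((pre.length : Int) + t.length) 1).foldl
        (fun acc j => PySem.List.pySetD acc j (g (PySem.List.pyGetD acc j d))) (pre ++ t)
      = pre ++ t.map g := by
  intro t
  induction t with
  | nil => intro pre; simp [PySem.List.pyRange_one_eq_nil]
  | cons x t' ih =>
    intro pre
    rw [PySem.List.pyRange_one_cons (by push_cast [List.length_cons]; omega)]
    simp only [List.foldl_cons, PySem.List.pySetD_natCast, PySem.List.pyGetD_natCast]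
    have hget : (pre ++ x :: t').getD pre.length d = x := by simp [List.getD]
    have hset : (pre ++ x :: t').set pre.length (g x) = (pre ++ [g x]) ++ t' := by simp
    rw [hget, hset]
    have harith : ((pre ++ [g x]).length : Int) = (pre.length : Int) + 1 := by simp
    have := ih (pre ++ [g x])
    rw [harith] at this
    have harith2 : (pre.length : Int) + 1 + (t'.length : Int)
        = (pre.length : Int) + ((x :: t').length : Int) := by push_cast [List.length_cons]; omega
    rw [harith2] at this
    rw [this]
    simp

theorem map0 {β : Type} (g : β → β) (d : β) (m : List β) :
    (PySem.List.pyRange 0 (m.length : Int) 1).foldl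
      (fun acc j => PySem.List.pySetD acc j (g (PySem.List.pyGetD acc j d))) m
    = m.map g := by
  have := mapAux g d m []
  simpa using this

-- a fold that repeatedly reads and writes the same row r is one write of a folded row
theorem setGetFold {β : Type} (d : β) (g : β → Int → β) (r : Nat) :
    ∀ (js : List Int) (m : List β), r < m.length →
      js.foldl (fun m j => PySem.List.pySetD m (r : Int) (g (PySem.List.pyGetD m (r : Int) d) j)) m
      = m.set r (js.foldl g (m.getD r d)) := by
  intro js
  induction js with
  | nil =>
    intro m hr
    simp only [List.foldl_nil]
    rw [List.getD_eq_getElem _ _ hr]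
    exact (List.set_getElem_self hr).symm
  | cons j js ih =>
    intro m hr
    simp only [List.foldl_cons, PySem.List.pySetD_natCast, PySem.List.pyGetD_natCast] at ih ⊢
    rw [ih _ (by simpa using hr)]
    have hgd : (m.set r (g (m.getD r d) j)).getD r d = g (m.getD r d) j := by
      rw [List.getD_eq_getElem _ _ (by simpa using hr)]
      simp [List.getElem_set_self, hr]
    rw [hgd, List.set_set]

-- enumerate, elementwise
theorem getElem?_enum {α : Type} :
    ∀ (xs : List α) (s : Int) (i : Nat),
      (PySem.List.enumerate xs s)[i]? = xs[i]?.map (fun x => (s + (i : Int), x)) := by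
  intro xs
  induction xs with
  | nil => intro s i; simp [PySem.List.enumerate]
  | cons x xs ih =>
    intro s i
    cases i with
    | zero => simp [PySem.List.enumerate_cons]
    | succ i =>
      simp only [PySem.List.enumerate_cons, List.getElem?_cons_succ]
      rw [ih (s + 1) i]
      cases xs[i]? with
      | none => simp
      | some y => simp; omega

-- proof-side canonical form of the bordered matrix
def fillN (c : Nat) (chr : String) (row : List String) : List String :=
  List.replicate c chr ++ row.drop c

def colset (c' : Int) (chr : String) (row : List String) : List String :=
  PySem.List.pySetD row c' chr

def canonM2 (mat : List (List String)) (chr : String) : List (List String) :=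
  let c := (mat.headD []).length
  let m1 := mat.set 0 (fillN c chr (mat.headD []))
  m1.set (mat.length - 1) (fillN c chr (m1.getD (mat.length - 1) []))

def canon (mat : List (List String)) (chr : String) : List (List String) :=
  ((canonM2 mat chr).map (colset 0 chr)).map (colset (((mat.headD []).length : Int) - 1) chr)

-- writing chr on the two edge cells of an already chr-filled prefix changes nothing
theorem set_eq_self_of_getElem {α : Type} {l : List α} {k : Nat} {v : α}
    (h : k < l.length) (hv : l[k] = v) : l.set k v = l := by
  rw [← hv]; exact List.set_getElem_self h

theorem setBorder (chr : String) (c : Nat) (hc : 1 ≤ c) (t : List String) :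
    PySem.List.pySetD (PySem.List.pySetD (List.replicate c chr ++ t) 0 chr) ((c : Int) - 1) chr
      = List.replicate c chr ++ t := by
  rw [PySem.List.pySetD_of_nonneg _ _ (by omega), PySem.List.pySetD_of_nonneg _ _ (by omega)]
  have hcn : ((c : Int) - 1).toNat = c - 1 := by omega
  have hlen : c - 1 < (List.replicate c chr ++ t).length := by simp; omega
  have h0 : (List.replicate c chr ++ t).set (0 : Int).toNat chr = List.replicate c chr ++ t := by
    refine set_eq_self_of_getElem (by simp; omega) ?_
    rw [List.getElem_append_left (by simpa using hc)]
    simp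
  rw [h0, hcn]
  refine set_eq_self_of_getElem hlen ?_
  rw [List.getElem_append_left (by simp; omega)]
  simp

theorem cornerA_eq (mat : List (List String)) (chr : String)
    (hc : 0 < (mat.headD []).length)
    (hall : ∀ row ∈ mat, (mat.headD []).length ≤ row.length) :
    corner mat chr = canon mat chr := by
  unfold corner
  have hr2 : PySem.List.pyRange 0 2 1 = [0, 1] := by decide
  have hga : ∀ (a b : Int), PySem.List.pyGetD [a, b] 0 0 = a := fun a b => rfl
  have hgb : ∀ (a b : Int), PySem.List.pyGetD [a, b] 1 0 = b := fun a b => rfl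
  simp only [hr2, List.foldl_cons, List.foldl_nil, hga, hgb]
  have hhead : PySem.List.pyGetD mat 0 [] = mat.headD [] := by
    have h := PySem.List.pyGetD_natCast mat 0 ([] : List String)
    cases mat <;> simp_all
  have hgd0 : mat.getD 0 [] = mat.headD [] := by cases mat <;> rfl
  have hmatne : mat ≠ [] := by intro h; subst h; simp at hc
  have hlen : 0 < mat.length := List.length_pos_of_ne_nil hmatne
  rw [hhead]
  have hn1 : (mat.length : Int) - 1 = ((mat.length - 1 : Nat) : Int) := by omega
  rw [hn1]
  -- first row sweep: fill row 0
  have S0 := setGetFold ([] : List String) (fun row j => PySem.List.pySetD row j chr) 0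
    (PySem.List.pyRange 0 ((mat.headD []).length : Int)) mat hlen
  simp only [Nat.cast_zero] at S0
  rw [S0, hgd0, fill0 chr (mat.headD []) (mat.headD []).length (le_refl _)]
  -- second row sweep: fill row nrows-1 of the updated matrix
  have S1 := setGetFold ([] : List String) (fun row j => PySem.List.pySetD row j chr)
    (mat.length - 1)
    (PySem.List.pyRange 0 ((mat.headD []).length : Int))
    (mat.set 0 (List.replicate (mat.headD []).length chr ++ List.drop (mat.headD []).length (mat.headD [])))
    (by simp [List.length_set]; omega)
  rw [S1]
  have hM1len : (mat.set 0 (List.replicate (mat.headD []).length chr ++ List.drop (mat.headD []).length (mat.headD []))).length = mat.length := by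
    simp
  have hidx : mat.length - 1 < (mat.set 0 (List.replicate (mat.headD []).length chr ++ List.drop (mat.headD []).length (mat.headD []))).length := by
    rw [hM1len]; omega
  have hrowlen : (mat.headD []).length ≤ ((mat.set 0 (List.replicate (mat.headD []).length chr ++ List.drop (mat.headD []).length (mat.headD []))).getD (mat.length - 1) []).length := by
    rw [List.getD_eq_getElem _ _ hidx, List.getElem_set]
    split
    · simp
    · exact hall _ (List.getElem_mem _)
  rw [fill0 chr _ _ hrowlen]
  -- the two column sweeps are maps over the rows
  set M2e := (mat.set 0 (List.replicate (mat.headD []).length chr ++ List.drop (mat.headD []).length (mat.headD []))).set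
      (mat.length - 1)
      (List.replicate (mat.headD []).length chr ++ List.drop (mat.headD []).length
        ((mat.set 0 (List.replicate (mat.headD []).length chr ++ List.drop (mat.headD []).length (mat.headD []))).getD
          (mat.length - 1) [])) with hM2e
  have hM2len : ((mat.length : Int)) = (M2e.length : Int) := by rw [hM2e]; simp
  rw [hM2len]
  have C0 := map0 (fun row => PySem.List.pySetD row 0 chr) ([] : List String) M2e
  rw [C0]
  have hM2len2 : ((M2e.length : Int)) = ((M2e.map (fun row => PySem.List.pySetD row 0 chr)).length : Int) := by simp
  rw [hM2len2]
  have C1 := map0 (fun row => PySem.List.pySetD row (((mat.headD []).length : Int) - 1) chr) ([] : List String)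
    (M2e.map (fun row => PySem.List.pySetD row 0 chr))
  rw [C1]
  rfl

theorem cornerB_eq (mat : List (List String)) (chr : String)
    (hc : 0 < (mat.headD []).length)
    (hall : ∀ row ∈ mat, (mat.headD []).length ≤ row.length) :
    corner_alt mat chr = canon mat chr := by
  unfold corner_alt
  have hhead : PySem.List.pyGetD mat 0 [] = mat.headD [] := by
    have h := PySem.List.pyGetD_natCast mat 0 ([] : List String)
    cases mat <;> simp_all
  have hmatne : mat ≠ [] := by intro h; subst h; simp at hc
  have hlen : 0 < mat.length := List.length_pos_of_ne_nil hmatne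
  obtain ⟨r0, rest, rfl⟩ := List.exists_cons_of_ne_nil hmatne
  set mat := r0 :: rest with hmat
  have hget0 : mat[0]'hlen = mat.headD [] := rfl
  rw [hhead]
  apply List.ext_getElem?
  intro i
  rw [List.getElem?_map, getElem?_enum]
  unfold canon canonM2 colset fillN
  simp only [List.getElem?_map]
  by_cases hi : i < mat.length
  · rw [List.getElem?_eq_getElem hi]
    rw [List.getElem?_set, List.getElem?_set]
    simp only [List.length_set, Option.map_some, zero_add]
    by_cases hi0 : i = 0
    · subst hi0
      rw [if_pos (by left; simp : ((0 : Nat) : Int) = 0 ∨ ((0 : Nat) : Int) = (mat.length : Int) - 1)]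
      rw [fill0 chr _ _ (hall _ (List.getElem_mem _)), hget0]
      by_cases hn1 : mat.length - 1 = 0
      · rw [if_pos hn1, if_pos (show mat.length - 1 < mat.length by omega)]
        have hgd : (mat.set 0 (List.replicate (mat.headD []).length chr ++ List.drop (mat.headD []).length (mat.headD []))).getD (mat.length - 1) []
            = List.replicate (mat.headD []).length chr ++ List.drop (mat.headD []).length (mat.headD []) := by
          rw [hn1, List.getD_eq_getElem _ _ (by simpa using hlen)]
          exact List.getElem_set_self _
        rw [hgd]
        have hdrop : List.drop (mat.headD []).length (List.replicate (mat.headD []).length chr ++ List.drop (mat.headD []).length (mat.headD []))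
            = List.drop (mat.headD []).length (mat.headD []) := by
          rw [List.drop_left' (by simp)]
        rw [hdrop]
        simp only [Option.map_some]
        rw [setBorder chr _ hc]
      · rw [if_neg hn1, if_pos rfl, if_pos hlen]
        simp only [Option.map_some]
        rw [setBorder chr _ hc]
    · by_cases hil : i = mat.length - 1
      · subst hil
        rw [if_pos (by right; omega : ((mat.length - 1 : Nat) : Int) = 0 ∨ ((mat.length - 1 : Nat) : Int) = (mat.length : Int) - 1)]
        rw [fill0 chr _ _ (hall _ (List.getElem_mem _))]
        rw [if_pos rfl, if_pos (show mat.length - 1 < mat.length by omega)]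
        have hgd : (mat.set 0 (List.replicate (mat.headD []).length chr ++ List.drop (mat.headD []).length (mat.headD []))).getD (mat.length - 1) []
            = mat[mat.length - 1]'(by omega) := by
          rw [List.getD_eq_getElem _ _ (by simpa using (show mat.length - 1 < mat.length by omega))]
          rw [List.getElem_set, if_neg (by omega)]
        rw [hgd]
        simp only [Option.map_some]
        rw [setBorder chr _ hc]
      · rw [if_neg (by omega : ¬(((i : Nat) : Int) = 0 ∨ ((i : Nat) : Int) = (mat.length : Int) - 1))]
        rw [if_neg (by omega : ¬(mat.length - 1 = i)), if_neg (by omega : ¬(0 = i))]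
        rw [List.getElem?_eq_getElem hi]
        simp only [Option.map_some]
  · have hni : mat.length ≤ i := by omega
    rw [List.getElem?_eq_none (by simpa using hni), List.getElem?_eq_none (by simpa using hni)]
    rfl

-- ===== VERDICT (by name: the statement is the Claim_ definition above) =====
theorem corner_spec : Claim_equal_corner := by
  intro mat chr _ hpre
  obtain ⟨hc, hall⟩ := hpre
  unfold Spec_corner
  rw [cornerA_eq mat chr hc hall, cornerB_eq mat chr hc hall]
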